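-- pv_equiv track=rewrite | github.com/Nominate-AI/cbos | cbos/core/screen.py | _extract_last_question
-- ===== SOURCE A (Python) =====
-- from typing import Optional
--
-- def _extract_last_question(
--     lines: list[str], max_lines: int = 10
-- ) -> Optional[str]:
--     """
--     Extract the last question/output Claude showed before the prompt.
--
--     Looks backwards from the prompt to find Claude's message.
--     """
--     question_lines = []
--
--     # Start from second-to-last line (skip the prompt)
--     for line in reversed(lines[:-1]):
--         stripped = line.strip()
--
--         # Stop if we hit a previous user input (starts with >)
--         if stripped.startswith(">") and not stripped.startswith("> "):
--             break
--
--         # Stop if we hit a tool result marker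
--         if stripped.startswith("Agent pid") or stripped.startswith("Identity added"):
--             continue  # Skip these noise lines
--
--         if stripped:
--             question_lines.insert(0, stripped)
--
--         if len(question_lines) >= max_lines:
--             break
--
--     return "\n".join(question_lines) if question_lines else None
-- ===== SOURCE B (Python) =====
-- from typing import Optional
--
--
-- def _extract_last_question(
--     lines: list[str], max_lines: int = 10
-- ) -> Optional[str]:
--     """Single forward pass: reset the collected segment at every user-input
--     marker line, otherwise collect stripped non-noise lines; keep the tail."""
--     if max_lines <= 0:
--         return None
--     segment: list[str] = []
--     for line in lines[:-1]:
--         s = line.strip()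
--         if s.startswith(">") and not s.startswith("> "):
--             segment = []
--         elif s and not s.startswith("Agent pid") and not s.startswith("Identity added"):
--             segment.append(s)
--     tail = segment[-max_lines:]
--     return "\n".join(tail) if tail else None
-- ===== Notes on version B (the rewrite author's own statement) =====
-- stated objective: alternative
-- what changed: Replaces A's backward scan with insert(0,...), an early-exit break and a manual line count by a single forward pass that resets the collected segment at each user-input marker line and then slices the last max_lines entries.
-- intended difference: On max_lines <= 0 where the last non-noise line of lines[:-1] is nonempty and not a '>'-marker, A still returns that single line (its count check only runs after a line is processed) while B returns None, the intended answer when at most 0 lines are requested. — e.g. on _extract_last_question(["hello", "> "], 0): A returns some "hello", B returns none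
import Mathlib
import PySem

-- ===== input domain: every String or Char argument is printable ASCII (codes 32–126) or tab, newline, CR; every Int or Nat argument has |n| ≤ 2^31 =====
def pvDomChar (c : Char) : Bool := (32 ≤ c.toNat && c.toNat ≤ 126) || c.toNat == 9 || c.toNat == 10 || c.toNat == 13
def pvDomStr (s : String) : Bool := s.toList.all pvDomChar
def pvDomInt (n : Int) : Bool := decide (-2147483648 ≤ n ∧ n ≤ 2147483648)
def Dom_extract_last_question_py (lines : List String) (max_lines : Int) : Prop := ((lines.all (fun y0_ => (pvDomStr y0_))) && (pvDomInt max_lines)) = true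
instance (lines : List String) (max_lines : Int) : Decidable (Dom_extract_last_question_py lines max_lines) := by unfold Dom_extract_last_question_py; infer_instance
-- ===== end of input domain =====

-- B replaces A's backward scan with insert(0, ·) and early exits by a single forward pass that
-- resets on user-input markers and keeps the tail (a different decomposition of the same task);
-- on the degenerate request max_lines ≤ 0 B returns None instead of A's accidental single line (see D_).

-- ===== PORT A =====
-- the two stripped-line tests A makes (named so the change region D_ below can cite them)
def pvIsCmd (s : String) : Bool :=
  PySem.Str.startswith s ">" && !PySem.Str.startswith s "> "
def pvIsNoise (s : String) : Bool :=
  PySem.Str.startswith s "Agent pid" || PySem.Str.startswith s "Identity added"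

-- literal port of A's backward loop: acc is question_lines, built with insert(0, ·)
def extractA_loop (max_lines : Int) : List String → List String → List String
  | [], acc => acc
  | line :: rest, acc =>
    let stripped := PySem.Str.strip line
    if pvIsCmd stripped then acc
    else if pvIsNoise stripped then
      extractA_loop max_lines rest acc
    else
      let acc' := if !(stripped == "") then stripped :: acc else acc
      if max_lines ≤ (acc'.length : Int) then acc'
      else extractA_loop max_lines rest acc'

def extract_last_question_py (lines : List String) (max_lines : Int) : Option String :=
  let question_lines := extractA_loop max_lines (PySem.List.slice lines none (some (-1))).reverse []
  if question_lines ≠ [] then some (PySem.Str.join "\n" question_lines) else none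

-- ===== PORT B =====
def extract_last_question_py_alt (lines : List String) (max_lines : Int) : Option String :=
  if max_lines ≤ 0 then none
  else
    let segment := (PySem.List.slice lines none (some (-1))).foldl (fun seg line =>
      let s := PySem.Str.strip line
      if PySem.Str.startswith s ">" && !PySem.Str.startswith s "> " then []
      else if !(s == "") && !PySem.Str.startswith s "Agent pid" && !PySem.Str.startswith s "Identity added" then
        seg ++ [s]
      else seg) []
    let tail := PySem.List.slice segment (some (-max_lines)) none
    if tail ≠ [] then some (PySem.Str.join "\n" tail) else none

-- ===== PRECONDITION & SPEC =====
-- On max_lines ≤ 0 whose last non-noise line of lines[:-1] is nonempty after stripping and is not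
-- a '>'-command marker, A still returns that single line (its count check only fires after a line
-- is processed), while B returns None — the intended answer when at most 0 lines are requested.
def D_extract_last_question_py (lines : List String) (max_lines : Int) : Prop :=
  max_lines ≤ 0 ∧
    (lines.dropLast.reverse.find? (fun y => !pvIsNoise (PySem.Str.strip y))).elim false
      (fun y => !(PySem.Str.strip y == "") && !pvIsCmd (PySem.Str.strip y)) = true
instance (lines : List String) (max_lines : Int) : Decidable (D_extract_last_question_py lines max_lines) := by
  unfold D_extract_last_question_py; infer_instance

def Spec_extract_last_question_py (lines : List String) (max_lines : Int) (out : Option String) : Prop :=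
  ¬ D_extract_last_question_py lines max_lines → out = extract_last_question_py_alt lines max_lines
instance (lines : List String) (max_lines : Int) (out : Option String) : Decidable (Spec_extract_last_question_py lines max_lines out) := by
  unfold Spec_extract_last_question_py; infer_instance

def pvDiffWitness_extract_last_question_py : List String × Int := (["hello", "> "], 0)
def pvDiffWitnessOut_extract_last_question_py : (Option String) × (Option String) := (some "hello", none)

-- ===== CLAIM (what is proved, stated in full; the proofs are below) =====
def Claim_unchanged_extract_last_question_py : Prop := ∀ (lines : List String) (max_lines : Int), Dom_extract_last_question_py lines max_lines → Spec_extract_last_question_py lines max_lines (extract_last_question_py lines max_lines)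
def Claim_changed_extract_last_question_py : Prop := Dom_extract_last_question_py (pvDiffWitness_extract_last_question_py.1) (pvDiffWitness_extract_last_question_py.2) ∧ D_extract_last_question_py (pvDiffWitness_extract_last_question_py.1) (pvDiffWitness_extract_last_question_py.2) ∧ extract_last_question_py (pvDiffWitness_extract_last_question_py.1) (pvDiffWitness_extract_last_question_py.2) = pvDiffWitnessOut_extract_last_question_py.1 ∧ extract_last_question_py_alt (pvDiffWitness_extract_last_question_py.1) (pvDiffWitness_extract_last_question_py.2) = pvDiffWitnessOut_extract_last_question_py.2 ∧ pvDiffWitnessOut_extract_last_question_py.1 ≠ pvDiffWitnessOut_extract_last_question_py.2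
def Claim_exact_extract_last_question_py : Prop := ∀ (lines : List String) (max_lines : Int), Dom_extract_last_question_py lines max_lines → D_extract_last_question_py lines max_lines → extract_last_question_py lines max_lines ≠ extract_last_question_py_alt lines max_lines

-- ===== LEMMAS AND PROOFS =====

-- a stripped line starting with '>' cannot start with 'Agent pid' / 'Identity added'
lemma pvDisjoint (s : String) (h : pvIsCmd s = true) : pvIsNoise s = false := by
  have h1 : PySem.Chars.startswith s.toList ['>'] = true := by
    have := (Bool.and_eq_true_iff.mp (by simpa only [pvIsCmd] using h)).1
    simpa using this
  cases hn : pvIsNoise s with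
  | false => rfl
  | true =>
    exfalso
    obtain ⟨t1, e1⟩ := (PySem.Chars.startswith_iff _ _).mp h1
    rcases Bool.or_eq_true_iff.mp (by simpa only [pvIsNoise] using hn) with h2 | h2 <;>
    · obtain ⟨t2, e2⟩ := (PySem.Chars.startswith_iff _ _).mp (by simpa using h2)
      rw [← e1] at e2
      simp at e2

-- the stripped, nonempty, non-noise lines of l up to (excluding) the first marker line
def pvF : List String → List String
  | [] => []
  | l :: rest =>
    let s := PySem.Str.strip l
    if PySem.Str.startswith s ">" && !PySem.Str.startswith s "> " then []
    else if PySem.Str.startswith s "Agent pid" || PySem.Str.startswith s "Identity added" then pvF rest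
    else if s == "" then pvF rest else s :: pvF rest

lemma extractA_loop_eq (m : Int) : ∀ (l acc : List String), (acc.length : Int) < m →
    extractA_loop m l acc = ((pvF l).take (m - acc.length).toNat).reverse ++ acc := by
  intro l
  induction l with
  | nil => intro acc _; simp [extractA_loop, pvF]
  | cons x rest ih =>
    intro acc hacc
    simp only [extractA_loop, pvF, pvIsCmd, pvIsNoise]
    by_cases hb : (PySem.Str.startswith (PySem.Str.strip x) ">" &&
        !PySem.Str.startswith (PySem.Str.strip x) "> ") = true
    · rw [if_pos hb, if_pos hb]
      simp
    · rw [if_neg hb, if_neg hb]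
      by_cases hn : (PySem.Str.startswith (PySem.Str.strip x) "Agent pid" ||
          PySem.Str.startswith (PySem.Str.strip x) "Identity added") = true
      · rw [if_pos hn, if_pos hn]
        exact ih acc hacc
      · rw [if_neg hn, if_neg hn]
        cases he : (PySem.Str.strip x == "") with
        | true =>
          have hbreak : ¬ (m ≤ ((acc.length : Int))) := by omega
          simp only [Bool.not_true, Bool.false_eq_true, if_false, if_true]
          rw [if_neg hbreak]
          exact ih acc hacc
        | false =>
          simp only [Bool.not_false, if_true, Bool.false_eq_true, if_false]
          by_cases hfull : m ≤ (((PySem.Str.strip x :: acc).length : Int))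
          · rw [if_pos hfull]
            have hm1 : m = (acc.length : Int) + 1 := by
              simp only [List.length_cons] at hfull; push_cast at hfull; omega
            have h1 : (m - (acc.length : Int)).toNat = 1 := by omega
            simp [h1]
          · rw [if_neg hfull]
            have h1 : ((PySem.Str.strip x :: acc).length : Int) < m := by
              simp only [List.length_cons] at hfull ⊢; push_cast at hfull ⊢; omega
            rw [ih (PySem.Str.strip x :: acc) h1]
            have hnat : (m - (acc.length : Int)).toNat
                = (m - ((PySem.Str.strip x :: acc).length : Int)).toNat + 1 := by
              simp only [List.length_cons]; push_cast; omega
            rw [hnat, List.take_succ_cons]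
            simp

lemma extractA_loop_nonpos (m : Int) (hm : m ≤ 0) : ∀ l : List String,
    extractA_loop m l [] =
      (l.find? (fun y => !pvIsNoise (PySem.Str.strip y))).elim []
        (fun y => if pvIsCmd (PySem.Str.strip y) then []
                  else if PySem.Str.strip y == "" then [] else [PySem.Str.strip y]) := by
  intro l
  induction l with
  | nil => simp [extractA_loop]
  | cons x rest ih =>
    simp only [extractA_loop]
    by_cases hb : pvIsCmd (PySem.Str.strip x) = true
    · have hnn : pvIsNoise (PySem.Str.strip x) = false := pvDisjoint _ hb
      rw [if_pos hb, List.find?_cons_of_pos (by simp [hnn])]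
      simp only [Option.elim_some]
      rw [if_pos hb]
    · rw [if_neg hb]
      by_cases hn : pvIsNoise (PySem.Str.strip x) = true
      · rw [if_pos hn, List.find?_cons_of_neg (by simp [hn])]
        exact ih
      · rw [if_neg hn, List.find?_cons_of_pos (by simp [Bool.eq_false_iff.mpr hn])]
        simp only [Option.elim_some]
        rw [if_neg hb]
        have hc0 : m ≤ ((([] : List String).length : Int)) := by simp; omega
        have hc1 : m ≤ ((([PySem.Str.strip x] : List String).length : Int)) := by simp; omega
        cases he : (PySem.Str.strip x == "") with
        | true =>
          simp only [Bool.not_true, Bool.false_eq_true, if_false, if_true]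
          rw [if_pos hc0]
        | false =>
          simp only [Bool.not_false, if_true, Bool.false_eq_true, if_false]
          rw [if_pos hc1]

lemma pvF_reverse_eq (l : List String) :
    pvF l.reverse = ((l.foldl (fun seg line =>
      let s := PySem.Str.strip line
      if PySem.Str.startswith s ">" && !PySem.Str.startswith s "> " then []
      else if !(s == "") && !PySem.Str.startswith s "Agent pid" && !PySem.Str.startswith s "Identity added" then
        seg ++ [s]
      else seg) [])).reverse := by
  induction l using List.reverseRecOn with
  | nil => simp [pvF]
  | append_singleton l x ih =>
    rw [List.reverse_append, List.foldl_append]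
    simp only [List.reverse_cons, List.reverse_nil, List.nil_append, List.singleton_append,
      List.foldl_cons, List.foldl_nil]
    simp only [pvF]
    by_cases hb : (PySem.Str.startswith (PySem.Str.strip x) ">" &&
        !PySem.Str.startswith (PySem.Str.strip x) "> ") = true
    · rw [if_pos hb, if_pos hb]; simp
    · rw [if_neg hb, if_neg hb]
      by_cases hn : (PySem.Str.startswith (PySem.Str.strip x) "Agent pid" ||
          PySem.Str.startswith (PySem.Str.strip x) "Identity added") = true
      · rw [if_pos hn]
        have h1 : (!(PySem.Str.strip x == "") && !PySem.Str.startswith (PySem.Str.strip x) "Agent pid"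
            && !PySem.Str.startswith (PySem.Str.strip x) "Identity added") = false := by
          rcases Bool.or_eq_true_iff.mp hn with h | h <;>
            simp only [h, Bool.not_true, Bool.and_false, Bool.false_and]
        rw [if_neg (by simp only [h1, Bool.false_eq_true, not_false_eq_true])]
        exact ih
      · rw [if_neg hn]
        have hor := Bool.eq_false_iff.mpr hn
        have hn1 : PySem.Str.startswith (PySem.Str.strip x) "Agent pid" = false :=
          (Bool.or_eq_false_iff.mp hor).1
        have hn2 : PySem.Str.startswith (PySem.Str.strip x) "Identity added" = false :=
          (Bool.or_eq_false_iff.mp hor).2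
        cases he : (PySem.Str.strip x == "") with
        | true =>
          simp only [Bool.not_true, Bool.false_eq_true, if_false, if_true, Bool.false_and]
          exact ih
        | false =>
          simp only [Bool.not_false, if_true, hn1, hn2, Bool.and_true, Bool.false_eq_true,
            if_false]
          rw [ih, List.reverse_append]
          simp

-- xs[-k:] is the reversed k-prefix of the reversed list
lemma pvSlice_neg_eq (xs : List String) (m : Int) (hm : 1 ≤ m) :
    PySem.List.slice xs (some (-m)) none = ((xs.reverse.take m.toNat).reverse) := by
  have h1 : (0 : Nat) < m.toNat := by omega
  have h2 : (-m) = -((m.toNat : Nat) : Int) := by omega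
  rw [h2, PySem.List.slice_from_neg_natCast _ _ h1]
  rw [← List.reverse_reverse (xs.drop (xs.length - m.toNat))]
  congr 1
  rw [List.reverse_drop, List.take_eq_take_iff]
  simp only [List.length_reverse]
  omega

-- ===== VERDICT (by name: the statement is the Claim_ definition above) =====
theorem extract_last_question_py_spec : Claim_unchanged_extract_last_question_py := by
  intro lines m _ hD
  simp only [extract_last_question_py, extract_last_question_py_alt,
    PySem.List.slice_to_neg_one]
  by_cases hm : m ≤ 0
  · rw [if_pos hm, extractA_loop_nonpos m hm]
    have hfm : (lines.dropLast.reverse.find? (fun y => !pvIsNoise (PySem.Str.strip y))).elim false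
        (fun y => !(PySem.Str.strip y == "") && !pvIsCmd (PySem.Str.strip y)) = false := by
      by_contra h
      exact hD ⟨hm, by simpa using h⟩
    cases hf : lines.dropLast.reverse.find? (fun y => !pvIsNoise (PySem.Str.strip y)) with
    | none => simp
    | some y =>
      rw [hf] at hfm
      simp only [Option.elim_some] at hfm ⊢
      by_cases hb : pvIsCmd (PySem.Str.strip y) = true
      · rw [if_pos hb]; simp
      · rw [if_neg hb]
        have hs : (PySem.Str.strip y == "") = true := by
          rcases Bool.and_eq_false_iff.mp hfm with h | h
          · cases hc : (PySem.Str.strip y == "") with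
            | true => rfl
            | false => rw [hc] at h; simp at h
          · exfalso
            apply hb
            cases hc : pvIsCmd (PySem.Str.strip y) with
            | true => rfl
            | false => rw [hc] at h; simp at h
        rw [if_pos hs]
        simp
  · have hm1 : (1 : Int) ≤ m := by omega
    rw [if_neg hm]
    have h0 : ((([] : List String).length : Int)) < m := by simp; omega
    rw [extractA_loop_eq m _ [] h0]
    rw [pvF_reverse_eq, pvSlice_neg_eq _ m hm1]
    simp

theorem extract_last_question_py_changed : Claim_changed_extract_last_question_py := by
  unfold Claim_changed_extract_last_question_py; decide

theorem extract_last_question_py_tight : Claim_exact_extract_last_question_py := by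
  intro lines m _ hD
  obtain ⟨hm, hfm⟩ := hD
  simp only [extract_last_question_py, extract_last_question_py_alt,
    PySem.List.slice_to_neg_one]
  rw [if_pos hm, extractA_loop_nonpos m hm]
  cases hf : lines.dropLast.reverse.find? (fun y => !pvIsNoise (PySem.Str.strip y)) with
  | none => rw [hf] at hfm; simp at hfm
  | some y =>
    rw [hf] at hfm
    simp only [Option.elim_some] at hfm ⊢
    obtain ⟨h1, h2⟩ := Bool.and_eq_true_iff.mp hfm
    have hs : (PySem.Str.strip y == "") = false := by
      cases hc : (PySem.Str.strip y == "") with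
      | false => rfl
      | true => rw [hc] at h1; simp at h1
    have hb : pvIsCmd (PySem.Str.strip y) = false := by
      cases hc : pvIsCmd (PySem.Str.strip y) with
      | false => rfl
      | true => rw [hc] at h2; simp at h2
    simp only [hb, hs, Bool.false_eq_true, if_false]
    simp
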